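-- pv_equiv track=rewrite | github.com/abrazinskas/FewSum | fewsum/utils/helpers/search.py | find_mirror_next
-- ===== SOURCE A (Python) =====
-- def find_mirror_next(seq, max_window_size, mirror_centre):
--     """Find the next token that will lead to a mirror pattern.
--
--     Searches in the range of `window_size` tokens to the left from the
--     `mirror_centre` if it's found.
--
--     E.g., in [a, b, AND, a] the next token should be 'b' to create a mirror
--     pattern.
--
--     Args:
--         seq (list): list of tokens or ids
--         max_window_size (int): maximum span of search from the found
--             `mirror_centre`.
--         mirror_centre (list): list of tokens/ids that should be searched for as
--             centres of mirror patterns.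
--
--     Returns:
--         next unit that that will lead to a mirror pattern.
--         if no units in the `max_window_size` are in `mirror_centre`, then it
--         will return None.
--     """
--     assert max_window_size > 0
--
--     for i in range(1, max_window_size + 1):
--         if len(seq) < 2*i:
--             continue
--         centre_indx = len(seq) - i
--         if seq[centre_indx] in mirror_centre:
--             left = seq[centre_indx - i:centre_indx-1]
--             right = seq[centre_indx + 1:]
--             next_unit = seq[centre_indx-1]
--             if left == right:
--                 return next_unit
-- ===== SOURCE B (Python) =====
-- def find_mirror_next(seq, max_window_size, mirror_centre):
--     assert max_window_size > 0
--     n = len(seq)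
--     r = seq[::-1]
--     centres = set(mirror_centre)
--     limit = min(max_window_size, n // 2)
--     # z[j] = length of the longest common prefix of r and r[j:], capped at j
--     z = []
--     for j in range(limit + 2):
--         k = 0
--         while k < j and j + k < n and r[k] == r[j + k]:
--             k += 1
--         z.append(k)
--     for i in range(1, limit + 1):
--         if r[i - 1] in centres and z[i + 1] >= i - 1:
--             return r[i]
--     return None
-- ===== Notes on version B (the rewrite author's own statement) =====
-- stated objective: alternative
-- what changed: B reverses the sequence once and precomputes a capped Z-array (longest-common-prefix lengths of the reversed sequence against its suffixes), deciding each candidate window by one set-membership test and one Z-array lookup, and caps its loop at min(max_window_size, len(seq)//2), instead of A's per-window slice construction and comparison over the full window range.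
import Mathlib
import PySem

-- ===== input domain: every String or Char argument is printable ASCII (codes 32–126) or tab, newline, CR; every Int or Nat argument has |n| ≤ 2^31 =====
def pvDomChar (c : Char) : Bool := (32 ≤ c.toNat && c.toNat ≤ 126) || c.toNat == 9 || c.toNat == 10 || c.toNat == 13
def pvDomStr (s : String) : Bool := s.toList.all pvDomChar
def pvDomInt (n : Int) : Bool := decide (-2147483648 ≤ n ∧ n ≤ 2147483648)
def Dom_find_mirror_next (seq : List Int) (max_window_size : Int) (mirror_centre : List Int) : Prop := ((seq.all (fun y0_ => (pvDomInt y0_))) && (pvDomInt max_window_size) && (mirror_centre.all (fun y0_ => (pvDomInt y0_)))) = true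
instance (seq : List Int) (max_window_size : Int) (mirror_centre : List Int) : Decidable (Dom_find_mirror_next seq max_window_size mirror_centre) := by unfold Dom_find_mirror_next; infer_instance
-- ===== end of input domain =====

-- B replaces A's per-window slice comparisons by one pass over the reversed sequence with a
-- precomputed (capped) Z-array of prefix-match lengths, plus a set for centre membership, and caps the search at min(w, n/2) ("alternative").

-- ===== PORT A =====
-- A's loop over range(1, max_window_size+1) with early return, step for step.
-- (indexing uses pyGetD: every index A evaluates is in range, so this is exact)
def goA (seq mc : List Int) : List Int → Option Int
  | [] => none
  | i :: rest =>
    if (seq.length : Int) < 2 * i then goA seq mc rest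
    else
      -- centre_indx = len(seq) - i, kept inline
      if PySem.List.pyGetD seq ((seq.length : Int) - i) 0 ∈ mc then
        if PySem.List.slice seq (some ((seq.length : Int) - i - i)) (some ((seq.length : Int) - i - 1))
           = PySem.List.slice seq (some ((seq.length : Int) - i + 1)) none then
          some (PySem.List.pyGetD seq ((seq.length : Int) - i - 1) 0)
        else goA seq mc rest
      else goA seq mc rest

def find_mirror_next (seq : List Int) (max_window_size : Int) (mirror_centre : List Int) : Option Int :=
  goA seq mirror_centre (PySem.List.pyRange 1 (max_window_size + 1) 1)

-- ===== PORT B =====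
-- Source B's inner while loop: longest common prefix of r and r[j:], capped at j.
def lcpAt (r : List Int) (j k : Nat) : Nat :=
  if k < j ∧ j + k < r.length ∧ r[k]? = r[j + k]? then lcpAt r j (k + 1) else k
termination_by j - k

-- Source B's z-array loop.
def zArr (r : List Int) (limit : Nat) : List Nat :=
  (List.range (limit + 2)).map (fun j => lcpAt r j 0)

-- Source B's final loop over range(1, limit+1).
def goB (r : List Int) (centres : PySem.Set Int) (z : List Nat) : List Nat → Option Int
  | [] => none
  | i :: rest =>
    if r.getD (i - 1) 0 ∈ centres ∧ z.getD (i + 1) 0 ≥ i - 1 then some (r.getD i 0)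
    else goB r centres z rest

def find_mirror_next_alt (seq : List Int) (max_window_size : Int) (mirror_centre : List Int) : Option Int :=
  goB seq.reverse (PySem.Set.ofList mirror_centre)
    (zArr seq.reverse (min max_window_size.toNat (seq.length / 2)))
    (List.range' 1 (min max_window_size.toNat (seq.length / 2)))

-- ===== PRECONDITION & SPEC =====
-- A asserts max_window_size > 0 (AssertionError otherwise); Pre_ is exactly that.
def Pre_find_mirror_next (seq : List Int) (max_window_size : Int) (mirror_centre : List Int) : Prop :=
  0 < max_window_size
instance (seq : List Int) (max_window_size : Int) (mirror_centre : List Int) : Decidable (Pre_find_mirror_next seq max_window_size mirror_centre) := by unfold Pre_find_mirror_next; infer_instance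

def pvWitness_find_mirror_next : List Int × Int × List Int := ([1, 2, 1, 2], 2, [1])

def Spec_find_mirror_next (seq : List Int) (max_window_size : Int) (mirror_centre : List Int) (out : Option Int) : Prop := out = find_mirror_next_alt seq max_window_size mirror_centre
instance (seq : List Int) (max_window_size : Int) (mirror_centre : List Int) (out : Option Int) : Decidable (Spec_find_mirror_next seq max_window_size mirror_centre out) := by unfold Spec_find_mirror_next; infer_instance

-- ===== CLAIM (what is proved, stated in full; the proofs are below) =====
def Claim_equal_find_mirror_next : Prop := ∀ (seq : List Int) (max_window_size : Int) (mirror_centre : List Int), Dom_find_mirror_next seq max_window_size mirror_centre → Pre_find_mirror_next seq max_window_size mirror_centre → Spec_find_mirror_next seq max_window_size mirror_centre (find_mirror_next seq max_window_size mirror_centre)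

-- ===== LEMMAS AND PROOFS =====

-- every position below the computed lcp matches
lemma lcpAt_matches (r : List Int) (j k : Nat) :
    ∀ m, k ≤ m → m < lcpAt r j k → r[m]? = r[j + m]? := by
  fun_induction lcpAt r j k with
  | case1 k h ih =>
    intro m hm hlt
    rcases Nat.eq_or_lt_of_le hm with rfl | h2
    · exact h.2.2
    · exact ih m h2 hlt
  | case2 k h =>
    intro m hm hlt; omega

-- at the stopping point, if still in range, there is a mismatch
lemma lcpAt_stop (r : List Int) (j k : Nat)
    (h1 : lcpAt r j k < j) (h2 : j + lcpAt r j k < r.length) :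
    r[lcpAt r j k]? ≠ r[j + lcpAt r j k]? := by
  fun_induction lcpAt r j k with
  | case1 k h ih => exact ih h1 h2
  | case2 k h =>
    intro hEq
    exact h ⟨h1, h2, hEq⟩

lemma lcp_iff (r : List Int) (t j : Nat) (htj : t < j) (hlen : j + t ≤ r.length) :
    (t ≤ lcpAt r j 0 ↔ r.take t = (r.drop j).take t) := by
  have hpt : (r.take t = (r.drop j).take t) ↔ ∀ m, m < t → r[m]? = r[j + m]? := by
    constructor
    · intro hEq m hm
      have := congrArg (fun l => l[m]?) hEq
      simpa [List.getElem?_take, List.getElem?_drop, hm] using this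
    · intro hAll
      apply List.ext_getElem?
      intro m
      by_cases hm : m < t
      · simpa [List.getElem?_take, List.getElem?_drop, hm] using hAll m hm
      · simp [hm]
  rw [hpt]
  constructor
  · intro hge m hm
    exact lcpAt_matches r j 0 m (Nat.zero_le _) (lt_of_lt_of_le hm hge)
  · intro hAll
    by_contra hnle
    have hlt : lcpAt r j 0 < t := Nat.lt_of_not_le hnle
    have h1 : lcpAt r j 0 < j := lt_of_lt_of_le hlt (Nat.le_of_lt htj)
    have h2 : j + lcpAt r j 0 < r.length := by omega
    exact lcpAt_stop r j 0 h1 h2 (hAll _ hlt)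

-- z-array lookup
lemma zArr_getD (r : List Int) (limit t : Nat) (ht : t < limit + 2) :
    (zArr r limit).getD t 0 = lcpAt r t 0 := by
  unfold zArr
  rw [List.getD_eq_getElem?_getD]
  simp [ht]

-- reversing a middle window: (l[a:a+t]).reverse = (l.reverse)[len-a-t : len-a]
lemma rev_take_drop (l : List Int) (a t : Nat) (h : a + t ≤ l.length) :
    ((l.drop a).take t).reverse = (l.reverse.drop (l.length - a - t)).take t := by
  apply List.ext_getElem
  · simp; omega
  · intro m h1 h2
    simp only [List.getElem_reverse, List.getElem_take, List.getElem_drop]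
    have hm : m < t := by simp at h1; omega
    congr 1
    simp
    omega

-- A's loop returns none once every remaining window size i has 2*i > len(seq)
lemma goA_skip (seq mc : List Int) :
    ∀ (m : Nat) (i b : Int), (b - i).toNat = m → (seq.length : Int) < 2 * i →
      goA seq mc (PySem.List.pyRange i b 1) = none := by
  intro m
  induction m with
  | zero =>
    intro i b hm h
    rw [PySem.List.pyRange_one_eq_nil (by omega)]
    rfl
  | succ m ih =>
    intro i b hm h
    rw [PySem.List.pyRange_one_cons (by omega)]
    show goA seq mc (i :: _) = none
    rw [goA, if_pos h]
    exact ih (i + 1) b (by omega) (by omega)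

-- the main loop correspondence, counting down the remaining iterations of B's loop
lemma main_loop (seq mc : List Int) (w : Int) (hw : 0 < w) :
    ∀ (m i : Nat), 1 ≤ i → i + m = min w.toNat (seq.length / 2) + 1 →
      goA seq mc (PySem.List.pyRange (i : Int) (w + 1) 1)
        = goB seq.reverse (PySem.Set.ofList mc)
            (zArr seq.reverse (min w.toNat (seq.length / 2))) (List.range' i m) := by
  intro m
  induction m with
  | zero =>
    intro i hi1 him
    rw [List.range'_zero]
    show _ = none
    by_cases hwle : w + 1 ≤ (i : Int)
    · rw [PySem.List.pyRange_one_eq_nil hwle]; rfl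
    · -- then i ≤ w, so limit = len/2 and 2*i > len
      apply goA_skip seq mc ((w + 1 - i).toNat) _ _ rfl
      have h1 : min w.toNat (seq.length / 2) = seq.length / 2 := by omega
      omega
  | succ m ih =>
    intro i hi1 him
    have hile : i ≤ min w.toNat (seq.length / 2) := by omega
    have h2i : 2 * i ≤ seq.length := by omega
    have hin : i < seq.length := by omega
    have hnin : seq.length - i < seq.length := by omega
    rw [PySem.List.pyRange_one_cons (by omega), List.range'_succ, goA, goB,
        if_neg (by omega : ¬ ((seq.length : Int) < 2 * (i : Int)))]
    have hci : ((seq.length : Int) - (i : Int)) = ((seq.length - i : Nat) : Int) := by omega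
    rw [hci, PySem.List.pyGetD_natCast, List.getD_eq_getElem _ _ hnin]
    -- the centre element equals r[i-1]
    have hrev1 : seq.reverse.getD (i - 1) 0 = seq[seq.length - i]'hnin := by
      have h1 : i - 1 < seq.reverse.length := by simp; omega
      rw [List.getD_eq_getElem _ _ h1, List.getElem_reverse]
      simp [show seq.length - 1 - (i - 1) = seq.length - i by omega]
    by_cases hmem : seq[seq.length - i]'hnin ∈ mc
    · rw [if_pos hmem]
      -- next_unit index and value
      have hci1 : ((seq.length - i : Nat) : Int) - 1 = ((seq.length - i - 1 : Nat) : Int) := by omega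
      have hn1 : seq.length - i - 1 < seq.length := by omega
      rw [hci1, PySem.List.pyGetD_natCast, List.getD_eq_getElem _ _ hn1]
      -- slices as drop/take
      have ha : ((seq.length - i : Nat) : Int) - (i : Int) = ((seq.length - 2 * i : Nat) : Int) := by omega
      have hb : ((seq.length - i : Nat) : Int) + 1 = ((seq.length - i + 1 : Nat) : Int) := by omega
      rw [ha, hb, PySem.List.slice_natCast, PySem.List.slice_from_natCast]
      have hmem' : seq.reverse.getD (i - 1) 0 ∈ PySem.Set.ofList mc := by
        rw [hrev1]; simpa [PySem.Set.mem_ofList] using hmem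
      have hval : seq.reverse.getD i 0 = seq[seq.length - i - 1]'hn1 := by
        have h1 : i < seq.reverse.length := by simp; omega
        rw [List.getD_eq_getElem _ _ h1, List.getElem_reverse]
        simp [show seq.length - 1 - i = seq.length - i - 1 by omega]
      have hzi : (zArr seq.reverse (min w.toNat (seq.length / 2))).getD (i + 1) 0
          = lcpAt seq.reverse (i + 1) 0 := zArr_getD _ _ _ (by omega)
      -- A's slice equality iff B's z-condition
      have hcond : ((seq.drop (seq.length - 2 * i)).take (seq.length - i - 1 - (seq.length - 2 * i))
            = seq.drop (seq.length - i + 1))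
          ↔ (i - 1 ≤ lcpAt seq.reverse (i + 1) 0) := by
        have hlen : (i + 1) + (i - 1) ≤ seq.reverse.length := by simp; omega
        rw [lcp_iff seq.reverse (i - 1) (i + 1) (by omega) hlen]
        rw [show seq.length - i - 1 - (seq.length - 2 * i) = i - 1 by omega]
        have hY : seq.drop (seq.length - i + 1) = (seq.drop (seq.length - i + 1)).take (i - 1) := by
          rw [List.take_of_length_le]; simp; omega
        rw [hY]
        constructor
        · intro hEq
          have h2 := congrArg List.reverse hEq
          rw [rev_take_drop seq (seq.length - 2 * i) (i - 1) (by omega),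
              rev_take_drop seq (seq.length - i + 1) (i - 1) (by omega)] at h2
          rw [show seq.length - (seq.length - 2 * i) - (i - 1) = i + 1 by omega,
              show seq.length - (seq.length - i + 1) - (i - 1) = 0 by omega,
              List.drop_zero] at h2
          exact h2.symm
        · intro hEq
          apply List.reverse_injective
          rw [rev_take_drop seq (seq.length - 2 * i) (i - 1) (by omega),
              rev_take_drop seq (seq.length - i + 1) (i - 1) (by omega),
              show seq.length - (seq.length - 2 * i) - (i - 1) = i + 1 by omega,
              show seq.length - (seq.length - i + 1) - (i - 1) = 0 by omega,
              List.drop_zero]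
          exact hEq.symm
      by_cases hXY : (seq.drop (seq.length - 2 * i)).take (seq.length - i - 1 - (seq.length - 2 * i))
          = seq.drop (seq.length - i + 1)
      · rw [if_pos hXY, if_pos ⟨hmem', by rw [hzi]; exact hcond.mp hXY⟩, hval]
      · rw [if_neg hXY, if_neg (fun hc => hXY (hcond.mpr (by rw [← hzi]; exact hc.2)))]
        exact ih (i + 1) (by omega) (by omega)
    · rw [if_neg hmem,
          if_neg (fun hc => hmem (by rw [hrev1] at hc; simpa [PySem.Set.mem_ofList] using hc.1))]
      exact ih (i + 1) (by omega) (by omega)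

-- ===== VERDICT (by name: the statement is the Claim_ definition above) =====
theorem find_mirror_next_spec : Claim_equal_find_mirror_next := by
  intro seq w mc _hdom hpre
  unfold Spec_find_mirror_next find_mirror_next find_mirror_next_alt
  rw [show (1 : Int) = ((1 : Nat) : Int) from rfl]
  exact main_loop seq mc w hpre (min w.toNat (seq.length / 2)) 1 le_rfl (by omega)
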